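-- pv_equiv track=rewrite | github.com/yena2bell/net_analyzer_v2 | function_objects/Iterator_module.py | generator_combination_num_in_defined_1
-- ===== SOURCE A (Python) =====
-- def generator_combination_num_in_defined_1(i_all_candiates, i_num_of_selected,
--                                            i_num_processes=1, i_ith_process=0):
--     """ make generator giving integer which has 'i_num_of_selected' of 1 when converted to binaray form.
--     and that integer's binary form has digits lesser than n"""
--     if i_all_candiates < i_num_of_selected:
--         raise ValueError("n should be larger or equal to i_num_of_1")
--     if i_all_candiates<=0:
--         raise ValueError("n shoule be larger than 0")
--
--     i_position_of_smallest_1 = 0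
--     i_position_of_smallest_0_after_first_1 = int(i_num_of_selected)
--     i_combination = pow(2,int(i_num_of_selected))-1
--     i_end_combination = i_combination * pow(2,(int(i_all_candiates)-int(i_num_of_selected)))
--
--     i_count = 0
--     if i_count%i_num_processes == i_ith_process:
--         yield i_combination
--
--     while i_combination < i_end_combination:
--         if i_position_of_smallest_0_after_first_1 == 1:
--             i_combination += pow(2, i_position_of_smallest_1)
--             i_position_of_smallest_1 += 1
--         else:
--             i_combination += pow(2, i_position_of_smallest_1 + i_position_of_smallest_0_after_first_1 - 1)
--             i_sum = i_position_of_smallest_1 + i_position_of_smallest_0_after_first_1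
--             i_combination = (i_combination>>i_sum)*pow(2,i_sum) + pow(2, i_position_of_smallest_0_after_first_1 - 1) -1
--             i_position_of_smallest_1 = 0
--
--         i_position_of_smallest_0_after_first_1 = 1
--         while (i_combination >> (i_position_of_smallest_1 + i_position_of_smallest_0_after_first_1))%2 == 1:
--             i_position_of_smallest_0_after_first_1 += 1
--
--         i_count += 1
--         if i_count%i_num_processes == i_ith_process:
--             yield i_combination
-- ===== SOURCE B (Python) =====
-- def generator_combination_num_in_defined_1(i_all_candiates, i_num_of_selected,
--                                            i_num_processes=1, i_ith_process=0):
--     """Same enumeration, but the successor combination is computed with Gosper's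
--     hack (constant number of arithmetic ops) instead of tracking bit positions."""
--     if i_all_candiates < i_num_of_selected:
--         raise ValueError("n should be larger or equal to i_num_of_1")
--     if i_all_candiates <= 0:
--         raise ValueError("n shoule be larger than 0")
--     i_combination = (1 << int(i_num_of_selected)) - 1
--     i_end_combination = i_combination << (int(i_all_candiates) - int(i_num_of_selected))
--     i_count = 0
--     if i_count % i_num_processes == i_ith_process:
--         yield i_combination
--     while i_combination < i_end_combination:
--         u = i_combination & -i_combination
--         v = i_combination + u
--         i_combination = v | (((i_combination ^ v) >> 2) // u)
--         i_count += 1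
--         if i_count % i_num_processes == i_ith_process:
--             yield i_combination
-- ===== Notes on version B (the rewrite author's own statement) =====
-- stated objective: alternative
-- what changed: The next combination is computed by Gosper's hack (u = c & -c; v = c + u; c = v | (((c ^ v) >> 2) // u)), a constant number of big-int operations on the single integer c, instead of A's bookkeeping of the lowest-1 position and the length of the low run of 1-bits with an inner bit-scanning while loop.
-- outside the precondition, e.g. on generator_combination_num_in_defined_1(2, -1, 1, 0): A returns [-0.5], B raises ValueError
import Mathlib
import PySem

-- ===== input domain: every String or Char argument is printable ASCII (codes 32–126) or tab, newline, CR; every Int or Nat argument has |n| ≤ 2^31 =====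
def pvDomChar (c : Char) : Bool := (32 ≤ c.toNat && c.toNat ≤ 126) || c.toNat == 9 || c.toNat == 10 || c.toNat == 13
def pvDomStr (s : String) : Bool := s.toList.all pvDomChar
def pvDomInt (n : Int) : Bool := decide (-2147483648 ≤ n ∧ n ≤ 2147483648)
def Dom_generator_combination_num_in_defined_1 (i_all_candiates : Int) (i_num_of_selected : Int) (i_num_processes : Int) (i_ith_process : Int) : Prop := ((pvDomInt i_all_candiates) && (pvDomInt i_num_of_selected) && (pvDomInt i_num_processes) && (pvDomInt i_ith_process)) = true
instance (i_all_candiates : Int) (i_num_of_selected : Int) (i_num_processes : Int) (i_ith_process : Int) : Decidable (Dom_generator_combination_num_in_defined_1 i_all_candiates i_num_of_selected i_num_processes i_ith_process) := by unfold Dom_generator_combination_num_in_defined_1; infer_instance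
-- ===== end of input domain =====

-- B replaces A's position-tracking successor step (lowest-1 position + run length + inner
-- bit-scanning while loop) by Gosper's hack on the single integer c; same guards, same striping.
-- Both functions are generators; the ports return the list of yielded values.

-- ===== PORT A =====

/-- `pow(2, e)`: exact for `e ≥ 0` (the only exponents reachable under `Pre_`). -/
def pyPow2 (e : Int) : Int := 2 ^ e.toNat

/-- Termination of A's inner while: an odd `d ≠ -1` strictly shrinks under halving. -/
lemma aInner_dec (d : Int) (h1 : PySem.Int.mod d 2 = 1) (h2 : d ≠ -1) :
    (PySem.Int.floordiv d 2).natAbs < d.natAbs := by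
  have h := PySem.Int.floordiv_mul_add_mod d 2
  omega

/-- A's inner `while (c >> (p1+p0)) % 2 == 1: p0 += 1`, streamed over
`d = c >> (p1+p0)` (each pass checks one bit further, i.e. halves `d`; exact for
`c ≥ 0` and `p1+p0 ≥ 0`, the only states reachable under `Pre_`). The `d ≠ -1`
conjunct is only a totality guard: Python loops forever there (`-1 >> j` stays `-1`),
and such a `d` never arises under `Pre_`. -/
def aInner (d p0 : Int) : Int :=
  if h : PySem.Int.mod d 2 = 1 ∧ d ≠ -1 then aInner (PySem.Int.floordiv d 2) (p0 + 1) else p0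
termination_by d.natAbs
decreasing_by exact aInner_dec d h.1 h.2

/-- The body of A's `if i_position_of_smallest_0_after_first_1 == 1: … else: …`,
returning the updated `(i_combination, i_position_of_smallest_1)`.
`c >> i_sum` is ported as floor division by `2^i_sum` (exact: Python's `>>` floors). -/
def aStep (c p1 p0 : Int) : Int × Int :=
  if p0 = 1 then (c + pyPow2 p1, p1 + 1)
  else
    let c1 := c + pyPow2 (p1 + p0 - 1)
    let s := p1 + p0
    ((PySem.Int.floordiv c1 (pyPow2 s)) * pyPow2 s + pyPow2 (p0 - 1) - 1, 0)

/-- A's outer `while i_combination < i_end_combination` loop; `acc` holds the yields in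
reverse. `fuel` only makes the loop total: under `Pre_` every iteration strictly
increases `i_combination`, so `(end - start) + 1` iterations always suffice. -/
def aLoop : Nat → Int → Int → Int → Int → Int → Int → Int → List Int → List Int
  | 0, _, _, _, _, _, _, _, acc => acc.reverse
  | fuel + 1, c, p1, p0, cnt, endc, np, ith, acc =>
    if c < endc then
      let cp := aStep c p1 p0
      let c' := cp.1
      let p1' := cp.2
      let p0' := aInner (PySem.Int.floordiv c' (pyPow2 (p1' + 1))) 1
      let cnt' := cnt + 1
      aLoop fuel c' p1' p0' cnt' endc np ith
        (if PySem.Int.mod cnt' np = ith then c' :: acc else acc)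
    else acc.reverse

def generator_combination_num_in_defined_1 (i_all_candiates : Int) (i_num_of_selected : Int) (i_num_processes : Int) (i_ith_process : Int) : List Int :=
  if i_all_candiates < i_num_of_selected then []      -- raise ValueError: outside Pre_
  else if i_all_candiates ≤ 0 then []                 -- raise ValueError: outside Pre_
  else
    let c := pyPow2 i_num_of_selected - 1             -- pow(2, int(k)) - 1  (k ≥ 0 under Pre_)
    let endc := c * pyPow2 (i_all_candiates - i_num_of_selected)
    let acc0 := if PySem.Int.mod 0 i_num_processes = i_ith_process then [c] else []
    aLoop ((endc - c).toNat + 1) c 0 i_num_of_selected 0 endc i_num_processes i_ith_process acc0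

-- ===== PORT B =====

/-- `x << e`: exact for `e ≥ 0` (the only shifts reachable under `Pre_`). -/
def bShl (x e : Int) : Int := x * 2 ^ e.toNat

/-- B's `while i_combination < i_end_combination` loop (Gosper's hack step);
`acc` holds the yields in reverse; `fuel` only makes the loop total (each step
strictly increases `c` under `Pre_`, so `(end - start) + 1` iterations suffice). -/
def bLoop : Nat → Int → Int → Int → Int → Int → List Int → List Int
  | 0, _, _, _, _, _, acc => acc.reverse
  | fuel + 1, c, cnt, endc, np, ith, acc =>
    if c < endc then
      let u := PySem.Int.band c (-c)
      let v := c + u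
      let c' := PySem.Int.bor v (PySem.Int.floordiv ((PySem.Int.bxor c v) >>> (2 : Nat)) u)
      let cnt' := cnt + 1
      bLoop fuel c' cnt' endc np ith (if PySem.Int.mod cnt' np = ith then c' :: acc else acc)
    else acc.reverse

def generator_combination_num_in_defined_1_alt (i_all_candiates : Int) (i_num_of_selected : Int) (i_num_processes : Int) (i_ith_process : Int) : List Int :=
  if i_all_candiates < i_num_of_selected then []      -- raise ValueError: outside Pre_
  else if i_all_candiates ≤ 0 then []                 -- raise ValueError: outside Pre_
  else
    let c := bShl 1 i_num_of_selected - 1             -- (1 << int(k)) - 1  (k ≥ 0 under Pre_)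
    let endc := bShl c (i_all_candiates - i_num_of_selected)
    let acc0 := if PySem.Int.mod 0 i_num_processes = i_ith_process then [c] else []
    bLoop ((endc - c).toNat + 1) c 0 endc i_num_processes i_ith_process acc0

-- ===== PRECONDITION & SPEC =====

-- Pre_ excludes exactly the inputs where A does not return a list of ints:
-- the two explicit ValueError guards (a < k, a ≤ 0), ZeroDivisionError for
-- i_num_processes = 0, and k < 0, where pow(2, k) is a float so A yields floats
-- (not values of the declared int type); B raises ValueError there (1 << k).
def Pre_generator_combination_num_in_defined_1 (i_all_candiates : Int) (i_num_of_selected : Int) (i_num_processes : Int) (i_ith_process : Int) : Prop :=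
  0 < i_all_candiates ∧ 0 ≤ i_num_of_selected ∧ i_num_of_selected ≤ i_all_candiates ∧ i_num_processes ≠ 0

instance (i_all_candiates : Int) (i_num_of_selected : Int) (i_num_processes : Int) (i_ith_process : Int) : Decidable (Pre_generator_combination_num_in_defined_1 i_all_candiates i_num_of_selected i_num_processes i_ith_process) := by unfold Pre_generator_combination_num_in_defined_1; infer_instance

def pvWitness_generator_combination_num_in_defined_1 : Int × Int × Int × Int := (5, 2, 2, 1)

def Spec_generator_combination_num_in_defined_1 (i_all_candiates : Int) (i_num_of_selected : Int) (i_num_processes : Int) (i_ith_process : Int) (out : List Int) : Prop := out = generator_combination_num_in_defined_1_alt i_all_candiates i_num_of_selected i_num_processes i_ith_process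
instance (i_all_candiates : Int) (i_num_of_selected : Int) (i_num_processes : Int) (i_ith_process : Int) (out : List Int) : Decidable (Spec_generator_combination_num_in_defined_1 i_all_candiates i_num_of_selected i_num_processes i_ith_process out) := by unfold Spec_generator_combination_num_in_defined_1; infer_instance

-- ===== CLAIM (what is proved, stated in full; the proofs are below) =====
def Claim_equal_generator_combination_num_in_defined_1 : Prop := ∀ (i_all_candiates : Int) (i_num_of_selected : Int) (i_num_processes : Int) (i_ith_process : Int), Dom_generator_combination_num_in_defined_1 i_all_candiates i_num_of_selected i_num_processes i_ith_process → Pre_generator_combination_num_in_defined_1 i_all_candiates i_num_of_selected i_num_processes i_ith_process → Spec_generator_combination_num_in_defined_1 i_all_candiates i_num_of_selected i_num_processes i_ith_process (generator_combination_num_in_defined_1 i_all_candiates i_num_of_selected i_num_processes i_ith_process)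

-- ===== LEMMAS AND PROOFS =====

/-- The loop invariant shape of the combination counter: `t` zero bits, then a run of
`o + 1` one bits, then a zero bit, then arbitrary high bits `H`. -/
def invC (H t o : Nat) : Nat := H * 2 ^ (t + o + 2) + (2 ^ (o + 1) - 1) * 2 ^ t

/-- The common value both step rules produce from `invC H t o`. -/
def nextC (H t o : Nat) : Nat := (2 * H + 1) * 2 ^ (t + o + 1) + (2 ^ o - 1)

lemma xor_split (i x y a b : Nat) (ha : a < 2 ^ i) (hb : b < 2 ^ i) :
    (2 ^ i * x + a) ^^^ (2 ^ i * y + b) = 2 ^ i * (x ^^^ y) + (a ^^^ b) := by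
  apply Nat.eq_of_testBit_eq
  intro j
  rw [Nat.testBit_xor, Nat.testBit_two_pow_mul_add _ ha, Nat.testBit_two_pow_mul_add _ hb,
      Nat.testBit_two_pow_mul_add _ (Nat.xor_lt_two_pow ha hb)]
  by_cases h : j < i <;> simp [h, Nat.testBit_xor]

lemma lor_split (i x y a b : Nat) (ha : a < 2 ^ i) (hb : b < 2 ^ i) :
    (2 ^ i * x + a) ||| (2 ^ i * y + b) = 2 ^ i * (x ||| y) + (a ||| b) := by
  apply Nat.eq_of_testBit_eq
  intro j
  rw [Nat.testBit_lor, Nat.testBit_two_pow_mul_add _ ha, Nat.testBit_two_pow_mul_add _ hb,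
      Nat.testBit_two_pow_mul_add _ (show a ||| b < 2 ^ i from Nat.bitwise_lt_two_pow ha hb)]
  by_cases h : j < i <;> simp [h]

lemma land_split (i x y a b : Nat) (ha : a < 2 ^ i) (hb : b < 2 ^ i) :
    (2 ^ i * x + a) &&& (2 ^ i * y + b) = 2 ^ i * (x &&& y) + (a &&& b) := by
  apply Nat.eq_of_testBit_eq
  intro j
  rw [Nat.testBit_land, Nat.testBit_two_pow_mul_add _ ha, Nat.testBit_two_pow_mul_add _ hb,
      Nat.testBit_two_pow_mul_add _ (show a &&& b < 2 ^ i from Nat.bitwise_lt_two_pow ha hb)]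
  by_cases h : j < i <;> simp [h]

lemma odd_land_pred (e : Nat) : (2 * e + 1) &&& (2 * e) = 2 * e := by
  have h1 : 2 * e + 1 = 2 ^ 1 * e + 1 := by ring
  have h2 : 2 * e = 2 ^ 1 * e + 0 := by ring
  rw [h1, h2, land_split 1 e e 1 0 (by norm_num) (by norm_num)]
  simp [Nat.and_self]

lemma even_xor_succ (H : Nat) : (2 * H) ^^^ (2 * H + 1) = 1 := by
  have h1 : 2 * H = 2 ^ 1 * H + 0 := by ring
  have h2 : 2 * H + 1 = 2 ^ 1 * H + 1 := by ring
  rw [h2, h1, xor_split 1 H H 0 1 (by norm_num) (by norm_num)]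
  simp

/-- Python's `c & -c` for a positive `c = d * 2^t` with `d` odd is the low bit `2^t`. -/
lemma band_neg_self (d t : Nat) (hd : d % 2 = 1) :
    PySem.Int.band ((d * 2 ^ t : Nat) : Int) (-((d * 2 ^ t : Nat) : Int)) = ((2 ^ t : Nat) : Int) := by
  obtain ⟨e, rfl⟩ : ∃ e, d = 2 * e + 1 := ⟨d / 2, by omega⟩
  have hP : 0 < 2 ^ t := Nat.two_pow_pos t
  have hpos : 0 < (2 * e + 1) * 2 ^ t := Nat.mul_pos (by omega) hP
  have hge : (0:Int) ≤ (((2 * e + 1) * 2 ^ t : Nat) : Int) := by positivity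
  have hlt : ¬ (0:Int) ≤ -(((2 * e + 1) * 2 ^ t : Nat) : Int) := by
    rw [neg_nonneg, not_le]
    exact_mod_cast hpos
  simp only [PySem.Int.band, if_pos hge, if_neg hlt, neg_neg, Int.toNat_natCast]
  have htn : ((((2 * e + 1) * 2 ^ t : Nat) : Int) - 1).toNat = (2 * e + 1) * 2 ^ t - 1 := by omega
  rw [htn]
  have hm1 : (2 * e + 1) * 2 ^ t - 1 = 2 ^ t * (2 * e) + (2 ^ t - 1) := by
    have h : (2 * e + 1) * 2 ^ t = 2 ^ t * (2 * e) + 2 ^ t := by ring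
    omega
  have hland : (2 * e + 1) * 2 ^ t &&& ((2 * e + 1) * 2 ^ t - 1) = 2 ^ t * (2 * e) := by
    rw [hm1, show (2 * e + 1) * 2 ^ t = 2 ^ t * (2 * e + 1) + 0 by ring,
        land_split t (2 * e + 1) (2 * e) 0 (2 ^ t - 1) hP (by omega), odd_land_pred e]
    simp
  rw [hland]
  have hfin : (2 * e + 1) * 2 ^ t - 2 ^ t * (2 * e) = 2 ^ t := by
    have h : (2 * e + 1) * 2 ^ t = 2 ^ t * (2 * e) + 2 ^ t := by ring
    omega
  rw [hfin]

lemma pyPow2_natCast (n : Nat) : pyPow2 ((n : Nat) : Int) = ((2 ^ n : Nat) : Int) := by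
  simp [pyPow2]

/-- A's inner while on `d` with `m` trailing one bits counts exactly `m`. -/
lemma aInner_run (m : Nat) : ∀ (K : Nat) (p0 : Int),
    aInner ((2 * K * 2 ^ m + (2 ^ m - 1) : Nat) : Int) p0 = p0 + (m : Int) := by
  induction m with
  | zero =>
    intro K p0
    have he : (2 * K * 2 ^ 0 + (2 ^ 0 - 1) : Nat) = 2 * K := by norm_num
    rw [he, aInner, dif_neg, Nat.cast_zero, add_zero]
    rintro ⟨h1, -⟩
    rw [show ((2:Int)) = ((2:Nat):Int) by norm_num, PySem.Int.mod_natCast] at h1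
    omega
  | succ m ih =>
    intro K p0
    have hX : (2 * K * 2 ^ (m + 1) + (2 ^ (m + 1) - 1) : Nat)
        = 2 * (2 * K * 2 ^ m + (2 ^ m - 1)) + 1 := by
      have := Nat.one_le_two_pow (n := m)
      rw [pow_succ]; ring_nf; omega
    have hc1 : PySem.Int.mod ((2 * (2 * K * 2 ^ m + (2 ^ m - 1)) + 1 : Nat) : Int) 2 = 1 := by
      rw [show ((2:Int)) = ((2:Nat):Int) by norm_num, PySem.Int.mod_natCast]
      have h : (2 * (2 * K * 2 ^ m + (2 ^ m - 1)) + 1) % 2 = 1 := by omega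
      rw [h]; norm_num
    have hc2 : ((2 * (2 * K * 2 ^ m + (2 ^ m - 1)) + 1 : Nat) : Int) ≠ -1 := by omega
    have hdiv : PySem.Int.floordiv ((2 * (2 * K * 2 ^ m + (2 ^ m - 1)) + 1 : Nat) : Int) 2
        = ((2 * K * 2 ^ m + (2 ^ m - 1) : Nat) : Int) := by
      rw [show ((2:Int)) = ((2:Nat):Int) by norm_num, PySem.Int.floordiv_natCast]
      congr 1
      omega
    rw [hX, aInner, dif_pos ⟨hc1, hc2⟩, hdiv, ih]
    push_cast
    ring

lemma invC_div (H' t' o' : Nat) :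
    PySem.Int.floordiv ((invC H' t' o' : Nat) : Int) (pyPow2 ((t' : Int) + 1))
      = ((2 * H' * 2 ^ o' + (2 ^ o' - 1) : Nat) : Int) := by
  rw [show ((t' : Int) + 1) = ((t' + 1 : Nat) : Int) by push_cast; ring, pyPow2_natCast,
      PySem.Int.floordiv_natCast]
  congr 1
  have hrepr : invC H' t' o' = 2 ^ (t' + 1) * (2 * H' * 2 ^ o' + (2 ^ o' - 1)) + 2 ^ t' := by
    unfold invC
    zify [Nat.one_le_two_pow]
    ring
  rw [hrepr, Nat.mul_add_div (Nat.two_pow_pos (t' + 1)),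
      Nat.div_eq_of_lt (by rw [pow_succ]; have := Nat.two_pow_pos t'; omega), add_zero]

/-- The inner-while result on the new combination: run length `o' + 1`. -/
lemma inner_at (H' t' o' : Nat) :
    aInner (PySem.Int.floordiv ((invC H' t' o' : Nat) : Int) (pyPow2 ((t' : Int) + 1))) 1
      = (o' : Int) + 1 := by
  rw [invC_div, aInner_run o' H' 1]
  ring

lemma aStep_zero (H t : Nat) :
    aStep ((invC H t 0 : Nat) : Int) (t : Int) 1 = (((nextC H t 0 : Nat) : Int), (t : Int) + 1) := by
  unfold aStep
  rw [if_pos rfl, pyPow2_natCast]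
  have h : invC H t 0 + 2 ^ t = nextC H t 0 := by
    unfold invC nextC
    zify [Nat.one_le_two_pow]
    ring
  simp only [Prod.mk.injEq]
  exact ⟨by exact_mod_cast h, trivial⟩

lemma aStep_succ (H t o : Nat) :
    aStep ((invC H t (o + 1) : Nat) : Int) (t : Int) ((o : Int) + 2)
      = (((nextC H t (o + 1) : Nat) : Int), 0) := by
  unfold aStep
  rw [if_neg (show ¬ ((o : Int) + 2 = 1) by omega)]
  simp only [Prod.mk.injEq]
  refine ⟨?_, trivial⟩
  rw [show ((t : Int) + ((o : Int) + 2) - 1) = ((t + o + 1 : Nat) : Int) by push_cast; ring,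
      show ((t : Int) + ((o : Int) + 2)) = ((t + o + 2 : Nat) : Int) by push_cast; ring,
      show ((o : Int) + 2 - 1) = ((o + 1 : Nat) : Int) by push_cast; ring,
      pyPow2_natCast, pyPow2_natCast, pyPow2_natCast,
      show ((invC H t (o + 1) : Nat) : Int) + ((2 ^ (t + o + 1) : Nat) : Int)
         = ((invC H t (o + 1) + 2 ^ (t + o + 1) : Nat) : Int) by push_cast; ring,
      PySem.Int.floordiv_natCast]
  have hq : (invC H t (o + 1) + 2 ^ (t + o + 1)) / 2 ^ (t + o + 2) = 2 * H + 1 := by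
    have hrepr : invC H t (o + 1) + 2 ^ (t + o + 1)
        = 2 ^ (t + o + 2) * (2 * H + 1) + (2 ^ (o + 1) - 1) * 2 ^ t := by
      unfold invC
      zify [Nat.one_le_two_pow]
      ring
    have hlt : (2 ^ (o + 1) - 1) * 2 ^ t < 2 ^ (t + o + 2) := by
      calc (2 ^ (o + 1) - 1) * 2 ^ t < 2 ^ (o + 1) * 2 ^ t := by
            exact (Nat.mul_lt_mul_right (Nat.two_pow_pos t)).mpr (by have := Nat.two_pow_pos (o + 1); omega)
        _ = 2 ^ (o + 1 + t) := by rw [← pow_add]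
        _ < 2 ^ (t + o + 2) := Nat.pow_lt_pow_right (by norm_num) (by omega)
    rw [hrepr, Nat.mul_add_div (Nat.two_pow_pos (t + o + 2)), Nat.div_eq_of_lt hlt, add_zero]
  rw [hq]
  have h : nextC H t (o + 1) = (2 * H + 1) * 2 ^ (t + o + 2) + (2 ^ (o + 1) - 1) := by
    unfold nextC
    rw [show t + (o + 1) + 1 = t + o + 2 from by omega]
  rw [h]
  push_cast [Nat.one_le_two_pow]
  ring

lemma bStep_eq (H t o : Nat) :
    (let c : Int := ((invC H t o : Nat) : Int)
     let u := PySem.Int.band c (-c)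
     let v := c + u
     PySem.Int.bor v (PySem.Int.floordiv ((PySem.Int.bxor c v) >>> (2 : Nat)) u))
      = ((nextC H t o : Nat) : Int) := by
  have h1 : (1:Nat) ≤ 2 ^ (o + 1) := Nat.one_le_two_pow
  have hd : invC H t o = (H * 2 ^ (o + 2) + (2 ^ (o + 1) - 1)) * 2 ^ t := by
    unfold invC
    zify [Nat.one_le_two_pow]
    ring
  have hodd : (H * 2 ^ (o + 2) + (2 ^ (o + 1) - 1)) % 2 = 1 := by
    have e1 : H * 2 ^ (o + 2) = 2 * (H * 2 ^ (o + 1)) := by ring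
    have e2 : 2 ^ (o + 1) = 2 * 2 ^ o := by ring
    have := Nat.one_le_two_pow (n := o)
    omega
  have hu : PySem.Int.band ((invC H t o : Nat) : Int) (-((invC H t o : Nat) : Int))
      = ((2 ^ t : Nat) : Int) := by
    rw [hd]
    exact band_neg_self _ t hodd
  have hv : ((invC H t o : Nat) : Int) + ((2 ^ t : Nat) : Int)
      = ((2 ^ (t + o + 1) * (2 * H + 1) + 0 : Nat) : Int) := by
    push_cast
    unfold invC
    push_cast [Nat.one_le_two_pow]
    ring
  have hr : (2 ^ (o + 1) - 1) * 2 ^ t < 2 ^ (t + o + 1) := by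
    calc (2 ^ (o + 1) - 1) * 2 ^ t < 2 ^ (o + 1) * 2 ^ t :=
          (Nat.mul_lt_mul_right (Nat.two_pow_pos t)).mpr (by omega)
      _ = 2 ^ (t + o + 1) := by rw [← pow_add]; ring_nf
  have hinv2 : invC H t o = 2 ^ (t + o + 1) * (2 * H) + (2 ^ (o + 1) - 1) * 2 ^ t := by
    unfold invC
    zify [Nat.one_le_two_pow]
    ring
  have hxor : PySem.Int.bxor ((invC H t o : Nat) : Int)
        ((2 ^ (t + o + 1) * (2 * H + 1) + 0 : Nat) : Int)
      = (((2 ^ (o + 2) - 1) * 2 ^ t : Nat) : Int) := by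
    rw [PySem.Int.bxor_natCast]
    congr 1
    rw [hinv2, xor_split (t + o + 1) (2 * H) (2 * H + 1) _ 0 hr (Nat.two_pow_pos _),
        even_xor_succ, Nat.xor_zero, mul_one]
    zify [Nat.one_le_two_pow, Nat.one_le_two_pow (n := o + 2)]
    ring
  have hshift : ((((2 ^ (o + 2) - 1) * 2 ^ t : Nat) : Int) >>> (2 : Nat))
      = (((2 ^ (o + 2) - 1) * 2 ^ t / 4 : Nat) : Int) := by
    rw [← Int.natCast_shiftRight]
    congr 1
    rw [Nat.shiftRight_eq_div_pow]
  have hdiv : PySem.Int.floordiv (((2 ^ (o + 2) - 1) * 2 ^ t / 4 : Nat) : Int) ((2 ^ t : Nat) : Int)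
      = ((2 ^ o - 1 : Nat) : Int) := by
    rw [PySem.Int.floordiv_natCast]
    congr 1
    rw [Nat.div_div_eq_div_mul, show (2 ^ (o + 2) - 1) * 2 ^ t = 2 ^ t * (2 ^ (o + 2) - 1) by ring,
        show (4 : Nat) * 2 ^ t = 2 ^ t * 4 by ring, Nat.mul_div_mul_left _ _ (Nat.two_pow_pos t)]
    have e : 2 ^ (o + 2) - 1 = 4 * (2 ^ o - 1) + 3 := by
      have e2 : 2 ^ (o + 2) = 4 * 2 ^ o := by ring
      have := Nat.one_le_two_pow (n := o)
      omega
    rw [e, Nat.mul_add_div (by norm_num)]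
    omega
  have hor : PySem.Int.bor ((2 ^ (t + o + 1) * (2 * H + 1) + 0 : Nat) : Int) ((2 ^ o - 1 : Nat) : Int)
      = ((nextC H t o : Nat) : Int) := by
    rw [PySem.Int.bor_natCast]
    congr 1
    have hw : 2 ^ o - 1 < 2 ^ (t + o + 1) := by
      have := Nat.pow_le_pow_right (show 1 ≤ 2 by norm_num) (show o ≤ t + o + 1 by omega)
      have := Nat.one_le_two_pow (n := o)
      omega
    rw [show (2 ^ o - 1 : Nat) = 2 ^ (t + o + 1) * 0 + (2 ^ o - 1) by ring_nf,
        lor_split (t + o + 1) (2 * H + 1) 0 0 (2 ^ o - 1) (Nat.two_pow_pos _) hw]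
    unfold nextC
    simp
    ring
  simp only []
  rw [hu, hv, hxor, hshift, hdiv, hor]

lemma exists_run (H : Nat) : ∃ K m, H = 2 * K * 2 ^ m + (2 ^ m - 1) := by
  induction H using Nat.strong_induction_on with
  | _ H ih =>
    rcases Nat.even_or_odd H with he | ho
    · exact ⟨H / 2, 0, by obtain ⟨e, rfl⟩ := he; omega⟩
    · obtain ⟨e, rfl⟩ := ho
      obtain ⟨K, m, hKm⟩ := ih e (by omega)
      refine ⟨K, m + 1, ?_⟩
      subst hKm
      have := Nat.one_le_two_pow (n := m)
      rw [pow_succ]; ring_nf; omega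

lemma next_inv_zero (H t : Nat) : ∃ K m, nextC H t 0 = invC K (t + 1) m := by
  obtain ⟨K, m, hKm⟩ := exists_run H
  refine ⟨K, m, ?_⟩
  subst hKm
  unfold nextC invC
  zify [Nat.one_le_two_pow]
  ring

lemma next_inv_succ (H t o : Nat) : nextC H t (o + 1) = invC ((2 * H + 1) * 2 ^ t) 0 o := by
  unfold nextC invC
  zify [Nat.one_le_two_pow]
  ring

lemma aLoop_stop (fuel : Nat) (c p1 p0 cnt endc np ith : Int) (acc : List Int)
    (h : ¬ c < endc) : aLoop fuel c p1 p0 cnt endc np ith acc = acc.reverse := by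
  cases fuel <;> simp [aLoop, h]

lemma bLoop_stop (fuel : Nat) (c cnt endc np ith : Int) (acc : List Int)
    (h : ¬ c < endc) : bLoop fuel c cnt endc np ith acc = acc.reverse := by
  cases fuel <;> simp [bLoop, h]

/-- Lockstep equality of the two loops on invariant states. -/
lemma loop_eq : ∀ (fuel : Nat) (H t o : Nat) (cnt endc np ith : Int) (acc : List Int),
    aLoop fuel ((invC H t o : Nat) : Int) (t : Int) ((o : Int) + 1) cnt endc np ith acc
      = bLoop fuel ((invC H t o : Nat) : Int) cnt endc np ith acc := by
  intro fuel
  induction fuel with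
  | zero => intros; rfl
  | succ fuel ih =>
    intro H t o cnt endc np ith acc
    by_cases hc : ((invC H t o : Nat) : Int) < endc
    · simp only [aLoop, bLoop]
      rw [if_pos hc, if_pos hc]
      rcases o with _ | o2
      · rw [show ((0:Nat):Int) + 1 = (1:Int) by norm_num, aStep_zero]
        dsimp only
        rw [bStep_eq H t 0]
        obtain ⟨K, m, hn⟩ := next_inv_zero H t
        rw [hn, show ((t:Int) + 1) = ((t + 1 : Nat) : Int) by push_cast; ring,
            inner_at K (t + 1) m]
        exact ih K (t + 1) m (cnt + 1) endc np ith _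
      · rw [show ((o2 + 1 : Nat) : Int) + 1 = ((o2 : Nat) : Int) + 2 by push_cast; ring,
            aStep_succ H t o2]
        dsimp only
        rw [bStep_eq H t (o2 + 1), next_inv_succ H t o2,
            show (0:Int) = ((0:Nat) : Int) by norm_num,
            inner_at ((2 * H + 1) * 2 ^ t) 0 o2]
        exact ih ((2 * H + 1) * 2 ^ t) 0 o2 (cnt + 1) endc np ith _
    · rw [aLoop_stop _ _ _ _ _ _ _ _ _ hc, bLoop_stop _ _ _ _ _ _ _ hc]

-- ===== VERDICT (by name: the statement is the Claim_ definition above) =====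
theorem generator_combination_num_in_defined_1_spec : Claim_equal_generator_combination_num_in_defined_1 := by
  intro a k np ith _ hpre
  obtain ⟨ha, hk0, hka, hnp⟩ := hpre
  unfold Spec_generator_combination_num_in_defined_1
  unfold generator_combination_num_in_defined_1 generator_combination_num_in_defined_1_alt
  rw [if_neg (by omega), if_neg (by omega), if_neg (by omega), if_neg (by omega)]
  simp only [bShl, pyPow2, one_mul]
  rcases Nat.eq_zero_or_pos k.toNat with hkz | hkp
  · -- k = 0 : c = 0, endc = 0, both loops exit at once
    have hc : ((2:Int) ^ k.toNat - 1) = 0 := by rw [hkz]; norm_num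
    rw [hc]
    norm_num
    rw [aLoop_stop _ _ _ _ _ _ _ _ _ (by omega), bLoop_stop _ _ _ _ _ _ _ (by omega)]
  · -- k ≥ 1 : initial state is invC 0 0 (k.toNat - 1)
    obtain ⟨o, ho⟩ : ∃ o, k.toNat = o + 1 := ⟨k.toNat - 1, by omega⟩
    have hcv : ((2:Int) ^ k.toNat - 1) = ((invC 0 0 o : Nat) : Int) := by
      rw [ho]
      unfold invC
      push_cast [Nat.one_le_two_pow]
      ring
    have hkv : k = (o : Int) + 1 := by omega
    rw [hcv, hkv, show (0:Int) = ((0:Nat) : Int) by norm_num]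
    exact loop_eq _ 0 0 o _ _ np ith _
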